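-- pv_equiv track=rewrite | github.com/NestorPala/tda-tp3 | ej005_algoritmo_de_aproximacion.py | aproximacion
-- ===== SOURCE A (Python) =====
-- def aproximacion(cantidad_de_grupos, habilidad_ordenada):
--     grupos = [[] for _ in range(cantidad_de_grupos)]
--     sumas_cuadradas = [0] * cantidad_de_grupos
--
--     for nombre, habilidad in habilidad_ordenada:
--         grupo_minimo = min(range(cantidad_de_grupos), key = lambda i: sumas_cuadradas[i])
--
--         grupos[grupo_minimo].append(nombre)
--
--         sumas_cuadradas[grupo_minimo] += habilidad
--
--     minimo = sum(j**2 for j in sumas_cuadradas)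
--
--     return grupos, minimo
-- ===== SOURCE B (Python) =====
-- # Alternative strategy: keep the groups in a queue of (sum, index) pairs sorted
-- # ascending, so the minimal group is always at the front; after updating its sum,
-- # re-insert it at the position found by a hand-rolled binary search instead of
-- # scanning all group sums per item as A does.
--
-- def _insertar(par, cola):
--     lo, hi = 0, len(cola)
--     while lo < hi:
--         medio = (lo + hi) // 2
--         if cola[medio] <= par:
--             lo = medio + 1
--         else:
--             hi = medio
--     cola.insert(lo, par)
--
--
-- def aproximacion(cantidad_de_grupos, habilidad_ordenada):
--     grupos = [[] for _ in range(cantidad_de_grupos)]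
--     cola = [(0, i) for i in range(cantidad_de_grupos)]
--     for nombre, habilidad in habilidad_ordenada:
--         suma, indice = cola.pop(0)
--         grupos[indice].append(nombre)
--         _insertar((suma + habilidad, indice), cola)
--     minimo = sum(s * s for s, _ in cola)
--     return grupos, minimo
-- ===== Notes on version B (the rewrite author's own statement) =====
-- stated objective: faster
-- what changed: Replaces A's per-item linear min-scan (min over range(k) with an indexing lambda) by a queue of (sum, index) pairs kept sorted ascending: the minimal group is popped from the front and re-inserted at the position found by a hand-rolled binary search.
import Mathlib
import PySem

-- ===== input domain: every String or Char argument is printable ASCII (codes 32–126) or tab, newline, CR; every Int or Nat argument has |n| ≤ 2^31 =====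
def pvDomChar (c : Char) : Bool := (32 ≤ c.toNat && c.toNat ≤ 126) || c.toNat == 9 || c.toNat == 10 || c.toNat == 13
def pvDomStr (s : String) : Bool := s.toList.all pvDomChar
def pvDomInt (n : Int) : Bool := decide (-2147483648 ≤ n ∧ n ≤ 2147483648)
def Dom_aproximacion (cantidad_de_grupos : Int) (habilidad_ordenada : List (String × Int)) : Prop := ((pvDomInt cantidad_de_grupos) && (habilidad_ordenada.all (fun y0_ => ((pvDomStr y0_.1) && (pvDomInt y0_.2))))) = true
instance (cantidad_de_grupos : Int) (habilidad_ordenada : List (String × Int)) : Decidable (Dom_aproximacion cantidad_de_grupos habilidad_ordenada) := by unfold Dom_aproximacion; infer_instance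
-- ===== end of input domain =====

-- B replaces A's per-item linear min-scan over all group sums by a queue of (sum, index)
-- pairs kept sorted ascending (pop the head, re-insert in order); return value only.

-- ===== PORT A =====
-- one iteration of A's for-loop: state = (grupos, sumas_cuadradas)
def stepA (cantidad_de_grupos : Int) (st : List (List String) × List Int)
    (nh : String × Int) : List (List String) × List Int :=
  let gm : Int := (PySem.List.min? (PySem.List.pyRange 0 cantidad_de_grupos 1)
      (fun i => PySem.List.pyGetD st.2 i 0)).getD 0
  (PySem.List.pySetD st.1 gm (PySem.List.pyGetD st.1 gm [] ++ [nh.1]),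
   PySem.List.pySetD st.2 gm (PySem.List.pyGetD st.2 gm 0 + nh.2))

def aproximacion (cantidad_de_grupos : Int) (habilidad_ordenada : List (String × Int)) : List (List String) × Int :=
  let grupos0 : List (List String) := (PySem.List.pyRange 0 cantidad_de_grupos 1).map (fun _ => [])
  let sumas0 : List Int := PySem.List.pyRepeat [0] cantidad_de_grupos
  let st := habilidad_ordenada.foldl (stepA cantidad_de_grupos) (grupos0, sumas0)
  (st.1, (st.2.map (fun j => j ^ 2)).sum)

-- ===== PORT B =====
-- _insertar's while loop: binary search for the insertion point (the position after
-- every entry ≤ par in tuple order), recursion on hi - lo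
def bisPosGo (cola : List (Int × Int)) (par : Int × Int) : Nat → Int → Int → Int
  | 0, lo, _ => lo
  | fuel + 1, lo, hi =>
    if lo < hi then
      if (PySem.List.pyGetD cola (PySem.Int.floordiv (lo + hi) 2) (0, 0)).1 < par.1 ∨
          ((PySem.List.pyGetD cola (PySem.Int.floordiv (lo + hi) 2) (0, 0)).1 = par.1 ∧
           (PySem.List.pyGetD cola (PySem.Int.floordiv (lo + hi) 2) (0, 0)).2 ≤ par.2) then
        bisPosGo cola par fuel (PySem.Int.floordiv (lo + hi) 2 + 1) hi
      else
        bisPosGo cola par fuel lo (PySem.Int.floordiv (lo + hi) 2)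
    else lo

-- the loop shrinks hi - lo by at least 1 per iteration, so hi - lo steps always suffice
def bisPos (cola : List (Int × Int)) (par : Int × Int) (lo hi : Int) : Int :=
  bisPosGo cola par (hi - lo).toNat lo hi

-- _insertar: binary search, then one insert
def insertarPy (par : Int × Int) (cola : List (Int × Int)) : List (Int × Int) :=
  PySem.List.insert cola (bisPos cola par 0 cola.length) par

-- one iteration of B's for-loop: state = (grupos, cola); Python raises IndexError on an
-- empty cola (cantidad_de_grupos ≤ 0), excluded by Pre_ — the port leaves the state as is
def stepB (st : List (List String) × List (Int × Int))
    (nh : String × Int) : List (List String) × List (Int × Int) :=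
  match st.2 with
  | [] => st
  | (suma, indice) :: resto =>
    (PySem.List.pySetD st.1 indice (PySem.List.pyGetD st.1 indice [] ++ [nh.1]),
     insertarPy (suma + nh.2, indice) resto)

def aproximacion_alt (cantidad_de_grupos : Int) (habilidad_ordenada : List (String × Int)) : List (List String) × Int :=
  let grupos0 : List (List String) := (PySem.List.pyRange 0 cantidad_de_grupos 1).map (fun _ => [])
  let cola0 : List (Int × Int) := (PySem.List.pyRange 0 cantidad_de_grupos 1).map (fun i => (0, i))
  let st := habilidad_ordenada.foldl stepB (grupos0, cola0)
  (st.1, (st.2.map (fun p => p.1 * p.1)).sum)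

-- ===== PRECONDITION & SPEC =====
-- A raises (ValueError: min of empty range) when cantidad_de_grupos ≤ 0 and the list is
-- nonempty (B raises IndexError there); exactly those inputs are excluded.
def Pre_aproximacion (cantidad_de_grupos : Int) (habilidad_ordenada : List (String × Int)) : Prop :=
  0 < cantidad_de_grupos ∨ habilidad_ordenada = []
instance (cantidad_de_grupos : Int) (habilidad_ordenada : List (String × Int)) : Decidable (Pre_aproximacion cantidad_de_grupos habilidad_ordenada) := by unfold Pre_aproximacion; infer_instance

def pvWitness_aproximacion : Int × (List (String × Int)) := (2, [("ana", 3), ("bob", 1), ("cle", 2)])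

def Spec_aproximacion (cantidad_de_grupos : Int) (habilidad_ordenada : List (String × Int)) (out : List (List String) × Int) : Prop := out = aproximacion_alt cantidad_de_grupos habilidad_ordenada
instance (cantidad_de_grupos : Int) (habilidad_ordenada : List (String × Int)) (out : List (List String) × Int) : Decidable (Spec_aproximacion cantidad_de_grupos habilidad_ordenada out) := by unfold Spec_aproximacion; infer_instance

-- ===== CLAIM (what is proved, stated in full; the proofs are below) =====
def Claim_equal_aproximacion : Prop := ∀ (cantidad_de_grupos : Int) (habilidad_ordenada : List (String × Int)), Dom_aproximacion cantidad_de_grupos habilidad_ordenada → Pre_aproximacion cantidad_de_grupos habilidad_ordenada → Spec_aproximacion cantidad_de_grupos habilidad_ordenada (aproximacion cantidad_de_grupos habilidad_ordenada)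

-- ===== LEMMAS AND PROOFS =====

-- the multiset of (sum, index) pairs carried by B, read off from A's sum list
def pairsOf (xs : List Int) : List (Int × Int) :=
  (PySem.List.enumerate xs 0).map (fun e => (e.2, e.1))

-- Python's lexicographic strict order on int pairs
def ltP (p q : Int × Int) : Prop := p.1 < q.1 ∨ (p.1 = q.1 ∧ p.2 < q.2)

lemma enumerate_getElem (xs : List Int) : ∀ (s : Int) (n : Nat) (h : n < xs.length),
    (PySem.List.enumerate xs s)[n]'(by simpa [PySem.List.length_enumerate] using h) = (s + n, xs[n]) := by
  induction xs with
  | nil => intro s n h; simp at h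
  | cons x t ih =>
    intro s n h
    cases n with
    | zero => simp [PySem.List.enumerate_cons]
    | succ m =>
      have hm : m < t.length := by simpa using h
      simp only [PySem.List.enumerate_cons, List.getElem_cons_succ, ih (s + 1) m hm]
      congr 1
      push_cast; ring

lemma pairsOf_length (xs : List Int) : (pairsOf xs).length = xs.length := by
  simp [pairsOf, PySem.List.length_enumerate]

lemma pairsOf_getElem (xs : List Int) (n : Nat) (h : n < xs.length) :
    (pairsOf xs)[n]'(by simpa [pairsOf_length] using h) = (xs[n], (n : Int)) := by
  simp [pairsOf, enumerate_getElem xs 0 n h]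

lemma mem_pairsOf {xs : List Int} {p : Int × Int} :
    p ∈ pairsOf xs ↔ ∃ n : Nat, ∃ h : n < xs.length, p = (xs[n], (n : Int)) := by
  constructor
  · intro hp
    obtain ⟨n, hn, he⟩ := List.mem_iff_getElem.mp hp
    have hn' : n < xs.length := by simpa [pairsOf_length] using hn
    exact ⟨n, hn', by rw [← he, pairsOf_getElem xs n hn']⟩
  · rintro ⟨n, h, rfl⟩
    rw [← pairsOf_getElem xs n h]
    exact List.getElem_mem _

lemma enumerate_set (xs : List Int) : ∀ (s : Int) (n : Nat) (v : Int),
    PySem.List.enumerate (xs.set n v) s = (PySem.List.enumerate xs s).set n (s + n, v) := by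
  induction xs with
  | nil => intro s n v; simp
  | cons x t ih =>
    intro s n v
    cases n with
    | zero => simp [PySem.List.enumerate_cons]
    | succ m =>
      simp only [List.set_cons_succ, PySem.List.enumerate_cons, ih (s + 1) m v]
      have : s + 1 + (m : Int) = s + ((m : Nat) + 1 : Nat) := by push_cast; ring
      rw [this]

lemma pairsOf_set (xs : List Int) (n : Nat) (v : Int) :
    pairsOf (xs.set n v) = (pairsOf xs).set n (v, (n : Int)) := by
  simp [pairsOf, enumerate_set xs 0 n v, List.map_set]

lemma map_fst_pairsOf (xs : List Int) : (pairsOf xs).map (·.1) = xs := by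
  simp only [pairsOf, List.map_map]
  exact PySem.List.map_snd_enumerate xs 0

lemma map_snd_pairsOf (xs : List Int) :
    (pairsOf xs).map (·.2) = PySem.List.pyRange 0 xs.length 1 := by
  simp only [pairsOf, List.map_map]
  have := PySem.List.map_fst_enumerate xs 0
  simpa using this

lemma perm_set_cons_eraseIdx (l : List (Int × Int)) (n : Nat) (h : n < l.length) (v : Int × Int) :
    (l.set n v).Perm (v :: l.eraseIdx n) := by
  rw [List.set_eq_take_append_cons_drop, if_pos h, List.eraseIdx_eq_take_drop_succ]
  exact List.perm_middle

lemma perm_cons_eraseIdx (l : List (Int × Int)) (n : Nat) (h : n < l.length) :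
    l.Perm (l[n] :: l.eraseIdx n) := by
  have h1 : l = l.take n ++ l[n] :: l.drop (n + 1) := by
    conv_lhs => rw [← List.take_append_drop n l]
    rw [List.getElem_cons_drop h]
  rw [List.eraseIdx_eq_take_drop_succ]
  conv_lhs => rw [h1]
  exact List.perm_middle

-- Python's tuple ≤ on int pairs
def lePp (p q : Int × Int) : Prop := p.1 < q.1 ∨ (p.1 = q.1 ∧ p.2 ≤ q.2)

lemma lePp_of_ltP_lePp {a b c : Int × Int} (h1 : ltP a b) (h2 : lePp b c) : lePp a c := by
  unfold ltP at h1
  unfold lePp at h2 ⊢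
  rcases h1 with h | h <;> rcases h2 with g | g
  · left; omega
  · left; omega
  · left; omega
  · right; omega

lemma not_lePp_of_ltP_not_lePp {a b c : Int × Int} (h1 : ltP a b) (h2 : ¬ lePp a c) :
    ¬ lePp b c := by
  unfold ltP at h1
  unfold lePp at h2 ⊢
  intro hbc
  apply h2
  rcases h1 with h | h <;> rcases hbc with g | g
  · left; omega
  · left; omega
  · left; omega
  · right; omega

lemma bisPosGo_between (cola : List (Int × Int)) (par : Int × Int) :
    ∀ (fuel : Nat) (lo hi : Int), lo ≤ hi →
      lo ≤ bisPosGo cola par fuel lo hi ∧ bisPosGo cola par fuel lo hi ≤ hi := by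
  intro fuel
  induction fuel with
  | zero => intro lo hi hle; simp only [bisPosGo]; omega
  | succ f ih =>
    intro lo hi hle
    simp only [bisPosGo]
    split
    · rename_i h
      split
      · have hb := PySem.Int.floordiv_two_mid_bounds (le_of_lt h)
        have hlt : PySem.Int.floordiv (lo + hi) 2 < hi := by
          rw [PySem.Int.floordiv_eq_ediv_of_pos (by norm_num)]
          omega
        have := ih (PySem.Int.floordiv (lo + hi) 2 + 1) hi (by omega)
        omega
      · have hb := PySem.Int.floordiv_two_mid_bounds (le_of_lt h)
        have := ih lo (PySem.Int.floordiv (lo + hi) 2) (by omega)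
        omega
    · omega

lemma bisPos_between (cola : List (Int × Int)) (par : Int × Int) :
    ∀ lo hi : Int, lo ≤ hi → lo ≤ bisPos cola par lo hi ∧ bisPos cola par lo hi ≤ hi := by
  intro lo hi hle
  exact bisPosGo_between cola par (hi - lo).toNat lo hi hle

lemma bisPosGo_spec (l : List (Int × Int)) (par : Int × Int) (hsort : l.Pairwise ltP) :
    ∀ (fuel : Nat) (lo hi : Int), 0 ≤ lo → hi ≤ l.length → (hi - lo).toNat ≤ fuel →
    (∀ (m : Nat) (hm : m < l.length), (m : Int) < lo → lePp l[m] par) →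
    (∀ (m : Nat) (hm : m < l.length), hi ≤ (m : Int) → ¬ lePp l[m] par) →
    (∀ (m : Nat) (hm : m < l.length), (m : Int) < bisPosGo l par fuel lo hi → lePp l[m] par) ∧
    (∀ (m : Nat) (hm : m < l.length), bisPosGo l par fuel lo hi ≤ (m : Int) → ¬ lePp l[m] par) := by
  have hpw := List.pairwise_iff_getElem.mp hsort
  intro fuel
  induction fuel with
  | zero =>
    intro lo hi hlo0 hhilen hfuel hbelow habove
    simp only [bisPosGo]
    constructor
    · intro m hm hmlt; exact hbelow m hm hmlt
    · intro m hm hmge; exact habove m hm (by omega)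
  | succ f ih =>
    intro lo hi hlo0 hhilen hfuel hbelow habove
    simp only [bisPosGo]
    split
    · rename_i h
      split
      · rename_i hcond
        have hb := PySem.Int.floordiv_two_mid_bounds (le_of_lt h)
        have hlt : PySem.Int.floordiv (lo + hi) 2 < hi := by
          rw [PySem.Int.floordiv_eq_ediv_of_pos (by norm_num)]
          omega
        have hmn : (PySem.Int.floordiv (lo + hi) 2).toNat < l.length := by omega
        have hget : PySem.List.pyGetD l (PySem.Int.floordiv (lo + hi) 2) (0, 0) =
            l[(PySem.Int.floordiv (lo + hi) 2).toNat] :=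
          PySem.List.pyGetD_eq_getElem (xs := l) (i := PySem.Int.floordiv (lo + hi) 2)
            (d := (0, 0)) (by omega) (by omega)
        have hmid : lePp l[(PySem.Int.floordiv (lo + hi) 2).toNat] par := by
          rw [hget] at hcond; exact hcond
        refine ih _ hi (by omega) hhilen (by omega) ?_ habove
        intro m hm hmlt
        by_cases hcase : (m : Int) < lo
        · exact hbelow m hm hcase
        · rcases eq_or_lt_of_le (show m ≤ (PySem.Int.floordiv (lo + hi) 2).toNat by omega)
            with rfl | hlt2
          · exact hmid
          · exact lePp_of_ltP_lePp (hpw m _ hm hmn hlt2) hmid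
      · rename_i hcond
        have hb := PySem.Int.floordiv_two_mid_bounds (le_of_lt h)
        have hlt : PySem.Int.floordiv (lo + hi) 2 < hi := by
          rw [PySem.Int.floordiv_eq_ediv_of_pos (by norm_num)]
          omega
        have hmn : (PySem.Int.floordiv (lo + hi) 2).toNat < l.length := by omega
        have hget : PySem.List.pyGetD l (PySem.Int.floordiv (lo + hi) 2) (0, 0) =
            l[(PySem.Int.floordiv (lo + hi) 2).toNat] :=
          PySem.List.pyGetD_eq_getElem (xs := l) (i := PySem.Int.floordiv (lo + hi) 2)
            (d := (0, 0)) (by omega) (by omega)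
        have hmid : ¬ lePp l[(PySem.Int.floordiv (lo + hi) 2).toNat] par := by
          rw [hget] at hcond; exact fun hx => hcond hx
        refine ih lo _ hlo0 (by omega) (by omega) hbelow ?_
        intro m hm hmge
        rcases eq_or_lt_of_le (show (PySem.Int.floordiv (lo + hi) 2).toNat ≤ m by omega)
          with rfl | hlt2
        · exact hmid
        · exact not_lePp_of_ltP_not_lePp (hpw _ m hmn hm hlt2) hmid
    · rename_i h
      constructor
      · intro m hm hmlt; exact hbelow m hm (by omega)
      · intro m hm hmge; exact habove m hm (by omega)

lemma bisPos_spec (l : List (Int × Int)) (par : Int × Int) (hsort : l.Pairwise ltP) :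
    ∀ lo hi : Int, 0 ≤ lo → hi ≤ l.length →
    (∀ (m : Nat) (hm : m < l.length), (m : Int) < lo → lePp l[m] par) →
    (∀ (m : Nat) (hm : m < l.length), hi ≤ (m : Int) → ¬ lePp l[m] par) →
    (∀ (m : Nat) (hm : m < l.length), (m : Int) < bisPos l par lo hi → lePp l[m] par) ∧
    (∀ (m : Nat) (hm : m < l.length), bisPos l par lo hi ≤ (m : Int) → ¬ lePp l[m] par) := by
  intro lo hi hlo0 hhilen hbelow habove
  exact bisPosGo_spec l par hsort (hi - lo).toNat lo hi hlo0 hhilen le_rfl hbelow habove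

lemma insertarPy_eq_take_drop (p : Int × Int) (l : List (Int × Int)) :
    insertarPy p l =
      l.take (bisPos l p 0 l.length).toNat ++ p :: l.drop (bisPos l p 0 l.length).toNat := by
  unfold insertarPy
  have hb := bisPos_between l p 0 l.length (by positivity)
  rw [show bisPos l p 0 l.length = (((bisPos l p 0 l.length).toNat : Nat) : Int) from by omega]
  rw [PySem.List.insert_natCast l (bisPos l p 0 l.length).toNat p (by omega)]
  congr 2

lemma insertarPy_perm (p : Int × Int) (l : List (Int × Int)) : (insertarPy p l).Perm (p :: l) := by
  rw [insertarPy_eq_take_drop]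
  have h := List.perm_middle (a := p) (l₁ := l.take (bisPos l p 0 l.length).toNat)
    (l₂ := l.drop (bisPos l p 0 l.length).toNat)
  rw [List.take_append_drop] at h
  exact h

lemma insertarPy_pairwise (p : Int × Int) (l : List (Int × Int))
    (hs : l.Pairwise ltP) (hne : ∀ q ∈ l, q.2 ≠ p.2) : (insertarPy p l).Pairwise ltP := by
  obtain ⟨hbelow, habove⟩ := bisPos_spec l p hs 0 l.length (by positivity) (by omega)
    (fun m hm h => absurd h (by omega)) (fun m hm h => absurd h (by omega))
  have hb := bisPos_between l p 0 l.length (by positivity)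
  set j := (bisPos l p 0 l.length).toNat with hj
  have hjlen : j ≤ l.length := by omega
  have hxlt : ∀ (m : Nat) (hm : m < l.length), m < j → ltP l[m] p := by
    intro m hm hmj
    have hle := hbelow m hm (by omega)
    have hne' : l[m].2 ≠ p.2 := hne l[m] (List.getElem_mem hm)
    unfold lePp at hle; unfold ltP; omega
  have hygt : ∀ (m : Nat) (hm : m < l.length), j ≤ m → ltP p l[m] := by
    intro m hm hmj
    have hgt := habove m hm (by omega)
    unfold lePp at hgt; unfold ltP; omega
  rw [insertarPy_eq_take_drop, ← hj]
  rw [List.pairwise_append]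
  refine ⟨hs.sublist (List.take_sublist ..), ?_, ?_⟩
  · rw [List.pairwise_cons]
    refine ⟨?_, hs.sublist (List.drop_sublist ..)⟩
    intro y hy
    obtain ⟨m, hm, rfl⟩ := List.mem_iff_getElem.mp hy
    have hm2 : j + m < l.length := by simp at hm; omega
    rw [List.getElem_drop]
    exact hygt (j + m) hm2 (by omega)
  · intro x hx y hy
    obtain ⟨m, hm, rfl⟩ := List.mem_iff_getElem.mp hx
    have hmj : m < j := by simpa [hjlen] using hm
    have hml : m < l.length := by omega
    rw [List.getElem_take]
    rcases List.mem_cons.mp hy with rfl | hy'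
    · exact hxlt m hml hmj
    · obtain ⟨m', hm', rfl⟩ := List.mem_iff_getElem.mp hy'
      have hm2 : j + m' < l.length := by simp at hm'; omega
      rw [List.getElem_drop]
      exact List.pairwise_iff_getElem.mp hs m (j + m') hml hm2 (by omega)

-- the fold step inside PySem.List.min?
def minStep (key : Int → Int) (acc : Option Int) (x : Int) : Option Int :=
  match acc with
  | none => some x
  | some m => if key x < key m then some x else some m

-- min? over range(0, k) picks the FIRST index attaining the minimal key
lemma min?_range_first (k i : Int) (key : Int → Int) (h0 : 0 ≤ i) (hik : i < k)
    (hmin : ∀ j, 0 ≤ j → j < k → key i ≤ key j)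
    (hfirst : ∀ j, 0 ≤ j → j < i → key i < key j) :
    PySem.List.min? (PySem.List.pyRange 0 k 1) key = some i := by
  have hkeep : ∀ (l : List Int) (m : Int), (∀ x ∈ l, ¬ key x < key m) →
      l.foldl (minStep key) (some m) = some m := by
    intro l
    induction l with
    | nil => intro m _; rfl
    | cons x t ih =>
      intro m hm
      have : minStep key (some m) x = some m := by
        simp [minStep, hm x (by simp)]
      rw [List.foldl_cons, this]
      exact ih m (fun y hy => hm y (by simp [hy]))
  have hsome : ∀ (l : List Int) (m : Int), ∃ c, l.foldl (minStep key) (some m) = some c ∧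
      (c = m ∨ c ∈ l) := by
    intro l
    induction l with
    | nil => intro m; exact ⟨m, rfl, Or.inl rfl⟩
    | cons x t ih =>
      intro m
      rw [List.foldl_cons]
      by_cases hx : key x < key m
      · obtain ⟨c, hc, hmem⟩ := ih x
        refine ⟨c, by simpa [minStep, hx] using hc, ?_⟩
        rcases hmem with rfl | h
        · exact Or.inr (by simp)
        · exact Or.inr (by simp [h])
      · obtain ⟨c, hc, hmem⟩ := ih m
        refine ⟨c, by simpa [minStep, hx] using hc, ?_⟩
        rcases hmem with rfl | h
        · exact Or.inl rfl
        · exact Or.inr (by simp [h])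
  have hstep : PySem.List.min? (PySem.List.pyRange 0 k 1) key =
      (PySem.List.pyRange 0 k 1).foldl (minStep key) none := by
    unfold PySem.List.min?
    congr 1
    funext acc x
    cases acc <;> rfl
  rw [hstep, PySem.List.pyRange_one_append 0 i k h0 hik.le,
      PySem.List.pyRange_one_cons hik, List.foldl_append]
  have htail : ∀ x ∈ PySem.List.pyRange (i + 1) k 1, ¬ key x < key i := by
    intro x hx
    have := PySem.List.mem_pyRange_one.mp hx
    exact not_lt.mpr (hmin x (by omega) (by omega))
  rcases eq_or_lt_of_le h0 with rfl | hpos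
  · rw [PySem.List.pyRange_one_eq_nil le_rfl]
    simp only [List.foldl_nil, List.foldl_cons]
    exact hkeep _ 0 htail
  · rw [PySem.List.pyRange_one_cons hpos, List.foldl_cons]
    obtain ⟨c, hc, hmem⟩ := hsome (PySem.List.pyRange (0 + 1) i 1) 0
    have e1 : List.foldl (minStep key) none (0 :: PySem.List.pyRange (0 + 1) i 1) = some c := by
      rw [List.foldl_cons]; exact hc
    rw [e1]
    have hci : 0 ≤ c ∧ c < i := by
      rcases hmem with rfl | h
      · exact ⟨le_rfl, hpos⟩
      · have := PySem.List.mem_pyRange_one.mp h; omega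
    have hlt : key i < key c := hfirst c hci.1 hci.2
    have e2 : minStep key (some c) i = some i := by simp [minStep, hlt]
    rw [e2]
    exact hkeep _ i htail

-- the one-step simulation: A's scan-for-min step and B's pop-head step produce the
-- same groups and related sum states
lemma step_rel (k : Int) (hk : 0 < k) (grupos : List (List String)) (sumas : List Int)
    (cola : List (Int × Int)) (hlen : sumas.length = k.toNat)
    (hperm : cola.Perm (pairsOf sumas)) (hpair : cola.Pairwise ltP) (nh : String × Int) :
    (stepA k (grupos, sumas) nh).1 = (stepB (grupos, cola) nh).1 ∧
    (stepA k (grupos, sumas) nh).2.length = k.toNat ∧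
    (stepB (grupos, cola) nh).2.Perm (pairsOf (stepA k (grupos, sumas) nh).2) ∧
    (stepB (grupos, cola) nh).2.Pairwise ltP := by
  have hlenc : cola.length = k.toNat := by rw [hperm.length_eq, pairsOf_length, hlen]
  obtain ⟨s, i0, resto, rfl⟩ : ∃ s i0 r, cola = (s, i0) :: r := by
    cases cola with
    | nil => simp at hlenc; omega
    | cons p r => exact ⟨p.1, p.2, r, rfl⟩
  have hhead : (s, i0) ∈ pairsOf sumas := hperm.subset (by simp)
  obtain ⟨n, hn, hpe⟩ := mem_pairsOf.mp hhead
  have hs : s = sumas[n] := by simpa using congrArg Prod.fst hpe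
  have hi0 : i0 = (n : Int) := by simpa using congrArg Prod.snd hpe
  subst hs; subst hi0
  have hkInt : (sumas.length : Int) = k := by omega
  have hkeyn : ∀ (j : Nat) (hj : j < sumas.length),
      PySem.List.pyGetD sumas (j : Int) 0 = sumas[j] := by
    intro j hj
    have := PySem.List.pyGetD_eq_getElem (xs := sumas) (i := (j : Int)) (d := 0)
      (by omega) (by omega)
    simpa using this
  have hmem : ∀ (j : Nat) (hj : j < sumas.length),
      (sumas[j], (j : Int)) ∈ (sumas[n], (n : Int)) :: resto :=
    fun j hj => hperm.symm.subset (mem_pairsOf.mpr ⟨j, hj, rfl⟩)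
  have hpairhead := (List.pairwise_cons.mp hpair).1
  have hmin : ∀ (j : Int), 0 ≤ j → j < k →
      PySem.List.pyGetD sumas (n : Int) 0 ≤ PySem.List.pyGetD sumas j 0 := by
    intro j hj0 hjk
    have hjn : j.toNat < sumas.length := by omega
    have hjeq : j = ((j.toNat : Nat) : Int) := by omega
    rw [hjeq, hkeyn n hn, hkeyn j.toNat hjn]
    rcases List.mem_cons.mp (hmem j.toNat hjn) with he | hr
    · have hfst : sumas[j.toNat] = sumas[n] := congrArg Prod.fst he
      exact le_of_eq hfst.symm
    · have hlt := hpairhead _ hr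
      unfold ltP at hlt
      simp only at hlt
      rcases hlt with h | ⟨h, _⟩
      · exact le_of_lt h
      · exact le_of_eq h
  have hfirst : ∀ (j : Int), 0 ≤ j → j < (n : Int) →
      PySem.List.pyGetD sumas (n : Int) 0 < PySem.List.pyGetD sumas j 0 := by
    intro j hj0 hjn'
    have hjn : j.toNat < sumas.length := by omega
    have hjeq : j = ((j.toNat : Nat) : Int) := by omega
    rw [hjeq, hkeyn n hn, hkeyn j.toNat hjn]
    rcases List.mem_cons.mp (hmem j.toNat hjn) with he | hr
    · exfalso
      have : ((j.toNat : Nat) : Int) = (n : Int) := by simpa using congrArg Prod.snd he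
      omega
    · have hlt := hpairhead _ hr
      unfold ltP at hlt
      simp only at hlt
      rcases hlt with h | ⟨_, h⟩
      · exact h
      · exfalso; omega
  have hgm : (PySem.List.min? (PySem.List.pyRange 0 k 1)
      (fun i => PySem.List.pyGetD sumas i 0)).getD 0 = (n : Int) := by
    rw [min?_range_first k (n : Int) _ (by omega) (by omega) hmin hfirst]
    rfl
  have hA : stepA k (grupos, sumas) nh =
      (PySem.List.pySetD grupos (n : Int) (PySem.List.pyGetD grupos (n : Int) [] ++ [nh.1]),
       sumas.set n (sumas[n] + nh.2)) := by
    unfold stepA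
    simp only [hgm]
    rw [hkeyn n hn]
    simp
  have hB : stepB (grupos, (sumas[n], (n : Int)) :: resto) nh =
      (PySem.List.pySetD grupos (n : Int) (PySem.List.pyGetD grupos (n : Int) [] ++ [nh.1]),
       insertarPy (sumas[n] + nh.2, (n : Int)) resto) := rfl
  have hplen : n < (pairsOf sumas).length := by rw [pairsOf_length]; omega
  have hrest : resto.Perm ((pairsOf sumas).eraseIdx n) := by
    have h2 := perm_cons_eraseIdx (pairsOf sumas) n hplen
    rw [pairsOf_getElem sumas n hn] at h2
    exact (hperm.trans h2).cons_inv
  have hnodup : (((sumas[n], (n : Int)) :: resto).map (·.2)).Nodup := by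
    have hp2 := hperm.map (fun p : Int × Int => p.2)
    rw [map_snd_pairsOf] at hp2
    exact hp2.nodup_iff.mpr (PySem.List.nodup_pyRange_one _ _)
  have hne : ∀ q ∈ resto, q.2 ≠ ((n : Int)) := by
    intro q hq he
    rw [List.map_cons] at hnodup
    have h1 := (List.nodup_cons.mp hnodup).1
    have h2m : q.2 ∈ resto.map (fun x => x.2) := List.mem_map_of_mem hq
    rw [he] at h2m
    exact h1 h2m
  refine ⟨?_, ?_, ?_, ?_⟩
  · rw [hA, hB]
  · rw [hA]; simp [hlen]
  · rw [hA, hB]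
    refine ((insertarPy_perm _ _).trans (hrest.cons _)).trans ?_
    rw [pairsOf_set]
    exact (perm_set_cons_eraseIdx _ n hplen _).symm
  · rw [hB]
    exact insertarPy_pairwise _ _ ((List.pairwise_cons.mp hpair).2) hne

lemma loop_rel (k : Int) (hk : 0 < k) :
    ∀ (hab : List (String × Int)) (grupos : List (List String)) (sumas : List Int)
      (cola : List (Int × Int)), sumas.length = k.toNat → cola.Perm (pairsOf sumas) →
      cola.Pairwise ltP →
      (hab.foldl (stepA k) (grupos, sumas)).1 = (hab.foldl stepB (grupos, cola)).1 ∧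
      (hab.foldl stepB (grupos, cola)).2.Perm (pairsOf (hab.foldl (stepA k) (grupos, sumas)).2) := by
  intro hab
  induction hab with
  | nil => exact fun grupos sumas cola hlen hperm hpair => ⟨rfl, hperm⟩
  | cons nh t ih =>
    intro grupos sumas cola hlen hperm hpair
    obtain ⟨h1, h2, h3, h4⟩ := step_rel k hk grupos sumas cola hlen hperm hpair nh
    simp only [List.foldl_cons]
    have eB : stepB (grupos, cola) nh =
        ((stepA k (grupos, sumas) nh).1, (stepB (grupos, cola) nh).2) := by rw [h1]
    rw [eB]
    rw [show stepA k (grupos, sumas) nh =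
        ((stepA k (grupos, sumas) nh).1, (stepA k (grupos, sumas) nh).2) from rfl]
    exact ih _ _ _ h2 h3 h4

lemma pairsOf_replicate (m : Nat) :
    pairsOf (List.replicate m (0 : Int)) = (PySem.List.pyRange 0 (m : Int) 1).map (fun i => (0, i)) := by
  apply List.ext_getElem
  · simp [pairsOf_length, PySem.List.length_pyRange_one]
  · intro n h1 h2
    have hn : n < m := by simpa [pairsOf_length] using h1
    rw [pairsOf_getElem _ n (by simpa using hn)]
    simp [PySem.List.getElem_pyRange_one]

-- ===== VERDICT (by name: the statement is the Claim_ definition above) =====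
lemma sum_sq_eq (A2 : List Int) (B2 : List (Int × Int)) (h : B2.Perm (pairsOf A2)) :
    (A2.map (fun j => j ^ 2)).sum = (B2.map (fun p => p.1 * p.1)).sum := by
  rw [(h.map (fun p : Int × Int => p.1 * p.1)).sum_eq]
  rw [show (fun p : Int × Int => p.1 * p.1) = (fun x : Int => x * x) ∘ (fun p : Int × Int => p.1) from rfl,
      ← List.map_map, map_fst_pairsOf]
  simp [pow_two]

theorem aproximacion_spec : Claim_equal_aproximacion := by
  unfold Claim_equal_aproximacion
  intro k hab _ hpre
  unfold Spec_aproximacion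
  simp only [aproximacion, aproximacion_alt]
  rcases hpre with hk | rfl
  · have hlen0 : (PySem.List.pyRepeat [(0 : Int)] k).length = k.toNat := by
      rw [PySem.List.pyRepeat_singleton]; simp
    have hinit : ((PySem.List.pyRange 0 k 1).map (fun i => ((0 : Int), i))).Perm
        (pairsOf (PySem.List.pyRepeat [0] k)) := by
      rw [PySem.List.pyRepeat_singleton, pairsOf_replicate k.toNat,
          show ((k.toNat : Nat) : Int) = k from by omega]
    have hpw : ((PySem.List.pyRange 0 k 1).map (fun i => ((0 : Int), i))).Pairwise ltP := by
      rw [List.pairwise_map]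
      exact (PySem.List.pairwise_lt_pyRange_one 0 k).imp (fun h => Or.inr ⟨rfl, h⟩)
    obtain ⟨h1, h2⟩ := loop_rel k hk hab ((PySem.List.pyRange 0 k 1).map (fun _ => []))
      (PySem.List.pyRepeat [0] k) ((PySem.List.pyRange 0 k 1).map (fun i => (0, i)))
      hlen0 hinit hpw
    rw [Prod.mk.injEq]
    exact ⟨h1, sum_sq_eq _ _ h2⟩
  · simp only [List.foldl_nil]
    rw [Prod.mk.injEq]
    refine ⟨rfl, ?_⟩
    have hA0 : ((PySem.List.pyRepeat [(0 : Int)] k).map (fun j => j ^ 2)).sum = 0 := by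
      rw [PySem.List.pyRepeat_singleton]
      simp
    have hB0 : (((PySem.List.pyRange 0 k 1).map (fun i => ((0 : Int), i))).map
        (fun p => p.1 * p.1)).sum = 0 := by
      apply List.sum_eq_zero
      intro x hx
      simp [List.map_map] at hx
      omega
    rw [hA0, hB0]
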